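-- pv_equiv track=rewrite | github.com/Oluwayhemisi/DataStructureAndAlgorithm | DSA/find_sum_of_positive.py | sum_integer
-- ===== SOURCE A (Python) =====
-- neg = []
--
-- def sum_integer(lst):
--     pos = 0
--     for i in range(len(lst)):
--         if lst[i] < 0:
--             neg.append(lst[i])
--         else:
--             pos += lst[i]
--     return pos
-- ===== SOURCE B (Python) =====
-- neg = []
--
-- def sum_integer(lst):
--     # total-minus-negatives: sum everything, then subtract the negatives' sum
--     negs = [x for x in lst if x < 0]
--     neg.extend(negs)
--     return sum(lst) - sum(negs)
-- ===== Notes on version B (the rewrite author's own statement) =====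
-- stated objective: alternative
-- what changed: Instead of conditionally accumulating only non-negatives, B sums the entire list unconditionally and subtracts the sum of the negatives; the branch inside the accumulation loop disappears.
import Mathlib
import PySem

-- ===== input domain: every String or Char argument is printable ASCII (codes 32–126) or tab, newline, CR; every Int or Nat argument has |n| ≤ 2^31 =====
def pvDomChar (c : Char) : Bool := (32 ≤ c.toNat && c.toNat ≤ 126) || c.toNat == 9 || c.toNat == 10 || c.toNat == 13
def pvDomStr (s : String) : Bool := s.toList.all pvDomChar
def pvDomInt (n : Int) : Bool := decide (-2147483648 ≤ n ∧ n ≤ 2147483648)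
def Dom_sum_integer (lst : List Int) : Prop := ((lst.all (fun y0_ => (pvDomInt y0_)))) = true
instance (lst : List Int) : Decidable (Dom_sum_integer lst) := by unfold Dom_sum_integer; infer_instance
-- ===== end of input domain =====

-- ===== PORT A =====
-- A also appends negatives to a module-level global `neg`; this file proves the RETURN value only
-- (B performs the same mutation in the same order).
-- loop over range(len(lst)) carrying the (neg, pos) state of A's body
def sumIntegerLoop (lst : List Int) : List Nat → List Int × Int → List Int × Int
  | [], st => st
  | i :: is, (neg, pos) =>
      let x := (PySem.List.pyGet? lst (Int.ofNat i)).getD 0  -- i < len lst, so always some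
      if x < 0 then sumIntegerLoop lst is (neg ++ [x], pos)
      else sumIntegerLoop lst is (neg, pos + x)

def sum_integer (lst : List Int) : Int :=
  (sumIntegerLoop lst (List.range lst.length) ([], 0)).2

-- ===== PORT B =====
-- B: collect the negatives, then return sum(lst) - sum(negs)
def sum_integer_alt (lst : List Int) : Int :=
  let negs := lst.filter (fun x => x < 0)
  lst.foldl (· + ·) 0 - negs.foldl (· + ·) 0

-- ===== PRECONDITION & SPEC =====
def Spec_sum_integer (lst : List Int) (out : Int) : Prop := out = sum_integer_alt lst
instance (lst : List Int) (out : Int) : Decidable (Spec_sum_integer lst out) := by unfold Spec_sum_integer; infer_instance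

-- ===== CLAIM =====
def Claim_equal_sum_integer : Prop := ∀ (lst : List Int), Dom_sum_integer lst → Spec_sum_integer lst (sum_integer lst)

-- ===== LEMMAS AND PROOFS =====
lemma foldl_add_init (init : Int) (l : List Int) :
    l.foldl (· + ·) init = init + l.foldl (· + ·) 0 := by
  induction l generalizing init with
  | nil => simp
  | cons y ys ihy => simp [List.foldl]; rw [ihy (init + y), ihy y]; ring

-- A's loop, started at position k, returns pos plus the non-negative sum of the rest
lemma loop_eq (lst rest : List Int) (k : Nat) (neg : List Int) (pos : Int)
    (h : lst.drop k = rest) :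
    (sumIntegerLoop lst ((List.range lst.length).drop k) (neg, pos)).2
      = pos + (rest.filter (fun x => !(x < 0))).foldl (· + ·) 0 := by
  induction rest generalizing k neg pos with
  | nil =>
      have hk : lst.length ≤ k := by
        by_contra hlt
        push_neg at hlt
        have := List.drop_eq_nil_iff.mp h
        omega
      rw [List.drop_eq_nil_iff.mpr (by simpa using hk)]
      simp [sumIntegerLoop, List.filter]
  | cons x xs ih =>
      have hk : k < lst.length := by
        by_contra hle
        push_neg at hle
        rw [List.drop_eq_nil_iff.mpr (by simpa using hle)] at h
        simp at h
      have hget : lst[k]'hk = x := by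
        have h2 : lst[k]? = some x := by
          simpa [List.head?_drop] using congrArg List.head? h
        rw [List.getElem?_eq_getElem hk] at h2
        exact Option.some.inj h2
      have hdrop : (List.range lst.length).drop k
          = k :: (List.range lst.length).drop (k+1) := by
        rw [List.drop_eq_getElem_cons (by simpa using hk)]
        simp
      have hgetv : (PySem.List.pyGet? lst (Int.ofNat k)).getD 0 = x := by
        simp [PySem.List.pyGet?, PySem.List.pyIdx?, hk, hget]
      have hxs : lst.drop (k+1) = xs := by
        have := congrArg List.tail h
        simpa [List.tail_drop] using this
      rw [hdrop]
      by_cases hx : x < 0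
      · simp only [sumIntegerLoop, hgetv, if_pos hx]
        rw [ih (k+1) (neg ++ [x]) pos hxs]
        simp [List.filter, hx]
      · simp only [sumIntegerLoop, hgetv, if_neg hx]
        rw [ih (k+1) neg (pos + x) hxs]
        simp [List.filter, hx]
        rw [foldl_add_init x (xs.filter fun x => !(x < 0))]
        ring

-- total sum = negatives' sum + non-negatives' sum
lemma total_split (lst : List Int) :
    lst.foldl (· + ·) 0
      = (lst.filter (fun x => x < 0)).foldl (· + ·) 0
        + (lst.filter (fun x => !(x < 0))).foldl (· + ·) 0 := by
  induction lst with
  | nil => simp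
  | cons x xs ih =>
      by_cases hx : x < 0 <;>
        simp [List.filter, hx, List.foldl, foldl_add_init x, ih] <;> ring

-- ===== VERDICT =====
theorem sum_integer_spec : Claim_equal_sum_integer := by
  intro lst _
  unfold Spec_sum_integer sum_integer sum_integer_alt
  have h1 := loop_eq lst lst 0 [] 0 (by simp)
  simp at h1
  rw [h1, total_split lst]
  ring
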